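-- pv_equiv track=rewrite | github.com/sunpeil/ieeextreme15 | expressionevaluation.py | for_find_cheng
-- ===== SOURCE A (Python) =====
-- def for_find_cheng(l,i):
--     if i < 0:
--         return False
--     try:
--         x = int(l[i])
--         return True
--     except ValueError:
--         if l[i] == '+' or l[i] == '*' or l[i] == '-':
--             return False
--         else:
--             flag = True
--             return for_find_cheng(l, i - 1)
-- ===== SOURCE B (Python) =====
-- def for_find_cheng(l, i):
--     for tok in reversed(l[:i + 1] if i >= 0 else []):
--         try:
--             int(tok)
--             return True
--         except ValueError:
--             if tok == '+' or tok == '*' or tok == '-':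
--                 return False
--     return False
-- ===== Notes on version B (the rewrite author's own statement) =====
-- stated objective: simpler
-- what changed: Replaces the recursion over a decreasing index with a single backward iteration over the prefix l[:i+1], so the scan is one flat loop over list elements instead of self-calls with index arithmetic.
import Mathlib
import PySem

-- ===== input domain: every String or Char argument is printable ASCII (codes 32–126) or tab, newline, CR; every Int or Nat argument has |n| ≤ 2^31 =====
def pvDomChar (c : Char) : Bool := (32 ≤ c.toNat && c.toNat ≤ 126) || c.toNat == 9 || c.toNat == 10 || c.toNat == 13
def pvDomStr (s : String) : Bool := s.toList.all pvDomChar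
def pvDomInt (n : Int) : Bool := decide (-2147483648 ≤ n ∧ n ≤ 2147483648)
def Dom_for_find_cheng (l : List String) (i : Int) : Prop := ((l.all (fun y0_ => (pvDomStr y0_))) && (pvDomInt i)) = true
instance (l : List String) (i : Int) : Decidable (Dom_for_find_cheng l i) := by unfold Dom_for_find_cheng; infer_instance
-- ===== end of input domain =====

-- B replaces A's recursion with one flat backward iteration over the prefix l[:i+1]; return value only.

-- ===== PORT A =====
def for_find_cheng (l : List String) (i : Int) : Bool :=
  if i < 0 then false
  else
    match PySem.List.pyGet? l i with
    | none => false   -- IndexError in Python; excluded by Pre_for_find_cheng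
    | some s =>
      match PySem.Int.ofStr? s with
      | some _ => true
      | none =>
        if s = "+" || s = "*" || s = "-" then false
        else for_find_cheng l (i - 1)
termination_by (i + 1).toNat
decreasing_by omega

-- ===== PORT B =====
-- the for-loop over the reversed prefix, early-exiting
def pvScan : List String → Bool
  | [] => false
  | t :: rest =>
    match PySem.Int.ofStr? t with
    | some _ => true
    | none =>
      if t = "+" || t = "*" || t = "-" then false
      else pvScan rest

def for_find_cheng_alt (l : List String) (i : Int) : Bool :=
  pvScan ((if 0 ≤ i then PySem.List.slice l none (some (i + 1)) else []).reverse)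

-- ===== PRECONDITION & SPEC =====
-- Pre_ excludes only i ≥ len(l), where the Python A raises IndexError.
def Pre_for_find_cheng (l : List String) (i : Int) : Prop := i < (l.length : Int)
instance (l : List String) (i : Int) : Decidable (Pre_for_find_cheng l i) := by unfold Pre_for_find_cheng; infer_instance
def pvWitness_for_find_cheng : List String × Int := (["+", "2"], 1)

def Spec_for_find_cheng (l : List String) (i : Int) (out : Bool) : Prop := out = for_find_cheng_alt l i
instance (l : List String) (i : Int) (out : Bool) : Decidable (Spec_for_find_cheng l i out) := by unfold Spec_for_find_cheng; infer_instance

-- ===== CLAIM (what is proved, stated in full; the proofs are below) =====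
def Claim_equal_for_find_cheng : Prop := ∀ (l : List String) (i : Int), Dom_for_find_cheng l i → Pre_for_find_cheng l i → Spec_for_find_cheng l i (for_find_cheng l i)

-- ===== LEMMAS AND PROOFS =====

lemma pv_A_neg (l : List String) (i : Int) (h : i < 0) : for_find_cheng l i = false := by
  unfold for_find_cheng
  rw [if_pos h]

lemma pv_main (l : List String) (n : Nat) (h : n < l.length) :
    for_find_cheng l (n : Int) = pvScan ((l.take (n + 1)).reverse) := by
  induction n with
  | zero =>
    unfold for_find_cheng
    rw [if_neg (show ¬(((0 : Nat) : Int) < 0) from by omega)]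
    have hx : l[0]? = some l[0] := List.getElem?_eq_getElem h
    simp only [PySem.List.pyGet?_natCast, hx, List.take_add_one, List.take_zero,
      List.nil_append, List.reverse_cons, List.reverse_nil, Option.toList]
    unfold pvScan
    rcases hof : PySem.Int.ofStr? l[0] with _ | v
    · simp [pvScan, pv_A_neg l (-1) (by omega)]
    · simp
  | succ m ih =>
    unfold for_find_cheng
    have hx : l[m + 1]? = some l[m + 1] := List.getElem?_eq_getElem h
    have hcast : ((m + 1 : Nat) : Int) = (m : Int) + 1 := by push_cast; ring
    rw [hcast]
    have hget : PySem.List.pyGet? l ((m : Int) + 1) = some l[m + 1] := by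
      rw [show (m : Int) + 1 = ((m + 1 : Nat) : Int) from by push_cast; ring,
        PySem.List.pyGet?_natCast, hx]
    simp only [show ¬((m : Int) + 1 < 0) from by omega, if_false, hget]
    have htake : (l.take (m + 1 + 1)).reverse = l[m + 1] :: (l.take (m + 1)).reverse := by
      rw [List.take_add_one, hx]
      simp
    rw [htake]
    unfold pvScan
    rcases hof : PySem.Int.ofStr? l[m + 1] with _ | v
    · simp only
      by_cases hop : l[m + 1] = "+" || l[m + 1] = "*" || l[m + 1] = "-"
      · simp [hop]
      · simp [hop]
        exact ih (by omega)
    · simp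

-- ===== VERDICT (by name: the statement is the Claim_ definition above) =====
theorem for_find_cheng_spec : Claim_equal_for_find_cheng := by
  intro l i _ hpre
  unfold Pre_for_find_cheng at hpre
  unfold Spec_for_find_cheng for_find_cheng_alt
  by_cases hneg : i < 0
  · rw [for_find_cheng]
    simp [hneg, show ¬(0 ≤ i) from by omega, pvScan]
  · obtain ⟨n, rfl⟩ : ∃ n : Nat, i = (n : Int) := ⟨i.toNat, by omega⟩
    have hn : n < l.length := by exact_mod_cast hpre
    rw [pv_main l n hn]
    simp only [show (0 : Int) ≤ (n : Int) from by omega, if_true]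
    congr 1
    rw [show (n : Int) + 1 = ((n + 1 : Nat) : Int) from by push_cast; ring,
      PySem.List.slice_to_natCast]
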